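-- pv_equiv track=rewrite | github.com/arifkhan1990/LeetCode-solution | 2443-sum-of-number-and-its-reverse/2443-sum-of-number-and-its-reverse.py | sumOfNumberAndReverse
-- ===== SOURCE A (Python) =====
-- def sumOfNumberAndReverse(num: int) -> bool:
--     i = 0
--     p = 0
--     while(i<=num):
--        j = int(str(i)[::-1])
--        if(i+j == num):
--            p = 1
--            break
--        i+=1
--     return 1 if p==1 else 0
-- ===== SOURCE B (Python) =====
-- def sumOfNumberAndReverse(num: int) -> int:
--     def hit(x):
--         return x + int(str(x)[::-1]) == num
--     lo, hi = 0, num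
--     while lo <= hi:
--         if hit(lo) or hit(hi):
--             return 1
--         lo += 1
--         hi -= 1
--     return 0
-- ===== Notes on version B (the rewrite author's own statement) =====
-- stated objective: alternative
-- what changed: A's single bottom-up while-loop with a flag and break is replaced by a two-pointer scan: lo and hi converge from the two ends of [0, num], each step probes both ends and shrinks the interval, returning early when either end is a witness; correctness rests on [0,num] being exactly the disjoint union of the probed pairs {lo, hi}.
import Mathlib
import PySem

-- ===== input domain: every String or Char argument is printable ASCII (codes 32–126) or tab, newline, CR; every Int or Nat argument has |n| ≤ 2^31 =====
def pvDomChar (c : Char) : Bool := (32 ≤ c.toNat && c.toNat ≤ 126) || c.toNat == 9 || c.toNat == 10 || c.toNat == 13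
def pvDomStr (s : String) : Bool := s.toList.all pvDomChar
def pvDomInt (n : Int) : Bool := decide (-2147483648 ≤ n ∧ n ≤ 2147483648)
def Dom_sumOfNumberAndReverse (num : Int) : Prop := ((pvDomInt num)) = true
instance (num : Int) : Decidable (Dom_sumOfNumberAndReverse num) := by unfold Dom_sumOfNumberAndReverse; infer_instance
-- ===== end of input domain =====

-- B replaces A's bottom-up while-loop/flag/break by a two-pointer scan converging from both
-- ends of [0, num] with early return; objective: alternative traversal, same exact value.

-- ===== PORT A =====
-- int(str(i)[::-1]): exact via PySem (Int.toStr, Str.slice? [::-1], Int.ofStr?); the .getD defaults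
-- are unreachable (slice? with step -1 is always some; a reversed decimal string of i ≥ 0 parses).
def pvJ (i : Int) : Int :=
  (PySem.Int.ofStr? ((PySem.Str.slice? (PySem.Int.toStr i) none none (-1)).getD "")).getD 0

-- A's while loop: i counts up, p is the flag, break is the early return of 1
def pvLoopA (num i p : Int) : Int :=
  if i ≤ num then
    if i + pvJ i = num then (1 : Int)  -- p = 1; break
    else pvLoopA num (i + 1) p
  else p
termination_by (num + 1 - i).toNat
decreasing_by omega

def sumOfNumberAndReverse (num : Int) : Int :=
  let p := pvLoopA num 0 0
  if p = 1 then 1 else 0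

-- ===== PORT B =====
-- B's helper hit(x): x + int(str(x)[::-1]) == num
def pvHit (num x : Int) : Bool := decide (x + pvJ x = num)

-- B's while loop: lo, hi converge from the two ends; early return 1 on a hit at either end
def pvLoopB (num lo hi : Int) : Int :=
  if lo ≤ hi then
    if pvHit num lo || pvHit num hi then (1 : Int)
    else pvLoopB num (lo + 1) (hi - 1)
  else 0
termination_by (hi + 1 - lo).toNat
decreasing_by omega

def sumOfNumberAndReverse_alt (num : Int) : Int := pvLoopB num 0 num

-- ===== PRECONDITION & SPEC =====
def Spec_sumOfNumberAndReverse (num : Int) (out : Int) : Prop := out = sumOfNumberAndReverse_alt num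
instance (num : Int) (out : Int) : Decidable (Spec_sumOfNumberAndReverse num out) := by unfold Spec_sumOfNumberAndReverse; infer_instance

-- ===== CLAIM (what is proved, stated in full; the proofs are below) =====
def Claim_equal_sumOfNumberAndReverse : Prop := ∀ (num : Int), Dom_sumOfNumberAndReverse num → Spec_sumOfNumberAndReverse num (sumOfNumberAndReverse num)

-- ===== LEMMAS AND PROOFS =====

-- A's loop started with p = 0 returns 1/0 according to whether some k in [i, num] hits num
theorem pvLoopA_eq_any (num i : Int) :
    pvLoopA num i 0 =
      if (PySem.List.pyRange i (num + 1) 1).any (pvHit num) then 1 else 0 := by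
  by_cases h : i ≤ num
  · rw [pvLoopA, if_pos h, PySem.List.pyRange_one_cons (by omega)]
    rw [List.any_cons]
    by_cases hh : i + pvJ i = num
    · rw [if_pos hh]
      have : pvHit num i = true := by simpa [pvHit] using hh
      rw [this, Bool.true_or, if_pos rfl]
    · rw [if_neg hh, pvLoopA_eq_any num (i + 1)]
      have : pvHit num i = false := by simpa [pvHit] using hh
      rw [this, Bool.false_or]
  · rw [pvLoopA, if_neg h, PySem.List.pyRange_one_eq_nil (by omega)]
    rw [List.any_nil]
    rfl
termination_by (num + 1 - i).toNat
decreasing_by omega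

-- B's two-pointer loop returns 1/0 according to whether some k in [lo, hi] hits num:
-- [lo, hi] is exactly {lo} ∪ {hi} ∪ [lo+1, hi-1], the pair probed plus the shrunk interval
theorem pvLoopB_eq_any (num lo hi : Int) :
    pvLoopB num lo hi =
      if (PySem.List.pyRange lo (hi + 1) 1).any (pvHit num) then 1 else 0 := by
  by_cases h : lo ≤ hi
  · rw [pvLoopB, if_pos h]
    have hsplit : (PySem.List.pyRange lo (hi + 1) 1).any (pvHit num) =
        (pvHit num lo || pvHit num hi || (PySem.List.pyRange (lo + 1) hi 1).any (pvHit num)) := by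
      apply Bool.eq_iff_iff.mpr
      simp only [List.any_eq_true, PySem.List.mem_pyRange_one, Bool.or_eq_true]
      constructor
      · rintro ⟨k, hk, hkhit⟩
        by_cases hklo : k = lo
        · exact Or.inl (Or.inl (hklo ▸ hkhit))
        · by_cases hkhi : k = hi
          · exact Or.inl (Or.inr (hkhi ▸ hkhit))
          · exact Or.inr ⟨k, by omega, hkhit⟩
      · rintro (hlo | ⟨k, hk, hkhit⟩)
        · rcases hlo with hlo | hhi
          · exact ⟨lo, by omega, hlo⟩
          · exact ⟨hi, by omega, hhi⟩
        · exact ⟨k, by omega, hkhit⟩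
    rw [hsplit]
    by_cases hends : (pvHit num lo || pvHit num hi) = true
    · rw [if_pos hends, hends, Bool.true_or, if_pos rfl]
    · rw [if_neg hends, pvLoopB_eq_any num (lo + 1) (hi - 1),
        Bool.eq_false_iff.mpr hends, Bool.false_or]
      have : hi - 1 + 1 = hi := by ring
      rw [this]
  · rw [pvLoopB, if_neg h, PySem.List.pyRange_one_eq_nil (by omega)]
    rw [List.any_nil]
    rfl
termination_by (hi + 1 - lo).toNat
decreasing_by omega

-- ===== VERDICT (by name: the statement is the Claim_ definition above) =====
theorem sumOfNumberAndReverse_spec : Claim_equal_sumOfNumberAndReverse := by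
  intro num _
  unfold Spec_sumOfNumberAndReverse sumOfNumberAndReverse sumOfNumberAndReverse_alt
  rw [pvLoopA_eq_any, pvLoopB_eq_any]
  by_cases h : (PySem.List.pyRange 0 (num + 1) 1).any (pvHit num) = true
  · rw [if_pos h]
    rfl
  · rw [if_neg h]
    rfl
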